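-- pv_equiv track=rewrite | github.com/lfdyf20/Leetcode | Remove N Duplicates.py | removeNDuplicates
-- ===== SOURCE A (Python) =====
-- def removeNDuplicates(nums, n):
-- 	from collections import Counter
-- 	counter = Counter(sorted(nums))
-- 	res = []
-- 	for i, num in sorted( counter.items() ):
-- 		if num != n:
-- 			res += [i]*num
-- 	return res
-- ===== SOURCE B (Python) =====
-- def removeNDuplicates(nums, n):
-- 	return sorted(x for x in nums if nums.count(x) != n)
-- ===== Notes on version B (the rewrite author's own statement) =====
-- stated objective: simpler
-- what changed: B builds no frequency structure and does no grouping: it keeps each element whose total multiplicity (via nums.count, a per-element rescan) is not n, and sorts the kept elements once at the end; A counts first (Counter over sorted input) and then emits each surviving key's block.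
import Mathlib
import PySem

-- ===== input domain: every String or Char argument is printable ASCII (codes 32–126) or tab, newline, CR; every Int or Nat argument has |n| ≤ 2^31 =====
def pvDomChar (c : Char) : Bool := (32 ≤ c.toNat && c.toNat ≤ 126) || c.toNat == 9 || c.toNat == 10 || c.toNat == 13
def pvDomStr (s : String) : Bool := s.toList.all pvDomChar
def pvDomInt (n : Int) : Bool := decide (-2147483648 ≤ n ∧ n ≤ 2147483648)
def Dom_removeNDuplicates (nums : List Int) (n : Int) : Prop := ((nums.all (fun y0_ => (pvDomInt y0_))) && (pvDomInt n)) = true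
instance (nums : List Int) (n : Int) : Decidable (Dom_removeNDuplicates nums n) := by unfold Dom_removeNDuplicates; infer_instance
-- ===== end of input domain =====

-- B replaces A's count-then-emit (Counter over sorted input, then a pass over its sorted items)
-- by filter-then-sort: keep each element whose multiplicity (a per-element list.count rescan) is
-- not n, then sort the survivors once — simpler, no frequency structure.


-- ===== PORT A =====
def removeNDuplicates (nums : List Int) (n : Int) : List Int :=
  let counter := PySem.Dict.counter (PySem.List.sorted nums (fun x => x) false)
  List.foldl
    (fun res p => if p.2 ≠ n then res ++ PySem.List.pyRepeat [p.1] p.2 else res) []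
    (PySem.List.sorted2 counter.items Prod.fst Prod.snd false)

-- ===== PORT B =====
-- sorted(x for x in nums if nums.count(x) != n)
def removeNDuplicates_alt (nums : List Int) (n : Int) : List Int :=
  PySem.List.sorted (nums.filter (fun x => (List.count x nums : Int) ≠ n)) (fun x => x) false

-- ===== PRECONDITION & SPEC =====
def Spec_removeNDuplicates (nums : List Int) (n : Int) (out : List Int) : Prop := out = removeNDuplicates_alt nums n
instance (nums : List Int) (n : Int) (out : List Int) : Decidable (Spec_removeNDuplicates nums n out) := by unfold Spec_removeNDuplicates; infer_instance

-- ===== CLAIM =====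
def Claim_equal_removeNDuplicates : Prop := ∀ (nums : List Int) (n : Int), Dom_removeNDuplicates nums n → Spec_removeNDuplicates nums n (removeNDuplicates nums n)

-- ===== LEMMAS AND PROOFS =====

-- common normal form: over the distinct values of s (in first-occurrence order),
-- emit count-many copies of each value whose count is not n
def pvNF (s : List Int) (n : Int) : List Int :=
  (PySem.Set.ofList s).flatMap
    (fun k => if ((List.count k s : Int)) ≠ n then List.replicate (List.count k s) k else [])

theorem pv_insertBy_congr {α : Type} (f g : α → α → Bool) (x : α) (acc : List α)
    (h : ∀ b ∈ acc, f x b = g x b) :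
    PySem.List.insertBy f x acc = PySem.List.insertBy g x acc := by
  induction acc with
  | nil => rfl
  | cons y ys ih =>
    have hy := h y (by simp)
    simp only [PySem.List.insertBy, hy]
    by_cases hg : g x y = true
    · simp [hg]
    · simp only [hg]
      simp [ih (fun b hb => h b (by simp [hb]))]

theorem pv_foldl_insertBy_congr {α : Type} (f g : α → α → Bool) (l acc : List α)
    (h : ∀ a ∈ l, ∀ b, (b ∈ acc ∨ b ∈ l) → f a b = g a b) :
    l.foldl (fun acc x => PySem.List.insertBy f x acc) acc
      = l.foldl (fun acc x => PySem.List.insertBy g x acc) acc := by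
  induction l generalizing acc with
  | nil => rfl
  | cons y ys ih =>
    simp only [List.foldl_cons]
    rw [pv_insertBy_congr f g y acc (fun b hb => h y (by simp) b (Or.inl hb))]
    refine ih _ (fun a ha b hb => h a (by simp [ha]) b ?_)
    rcases hb with hb | hb
    · rcases (PySem.List.mem_insertBy _ _ _ _).1 hb with h' | h'
      · exact Or.inr (by simp [h'])
      · exact Or.inl h'
    · exact Or.inr (by simp [hb])

theorem pv_foldl_add_cons (x : Int) (l : List Int) (s : List Int) (hx : x ∉ l) :
    l.foldl PySem.Set.add (x :: s) = x :: l.foldl PySem.Set.add s := by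
  induction l generalizing s with
  | nil => rfl
  | cons y ys ih =>
    have hyx : y ≠ x := fun h => hx (by simp [h])
    have hx' : x ∉ ys := fun h => hx (by simp [h])
    have hstep : PySem.Set.add (x :: s) y = x :: PySem.Set.add s y := by
      by_cases hy : y ∈ s
      · simp [PySem.Set.add, PySem.Set.contains, hy, hyx]
      · simp [PySem.Set.add, PySem.Set.contains, hy, hyx]
    simp only [List.foldl_cons, hstep]
    exact ih _ hx'

theorem pv_foldl_add_of_mem (l : List Int) (acc : List Int) (h : ∀ y ∈ l, y ∈ acc) :
    l.foldl PySem.Set.add acc = acc := by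
  induction l with
  | nil => rfl
  | cons y ys ih =>
    have hstep : PySem.Set.add acc y = acc := by
      simp [PySem.Set.add, PySem.Set.contains, h y (by simp)]
    simp only [List.foldl_cons, hstep]
    exact ih (fun z hz => h z (by simp [hz]))

theorem pv_ofList_run (x : Int) (t : List Int) (hx : x ∉ t.dropWhile (· == x)) :
    PySem.Set.ofList (x :: t) = x :: PySem.Set.ofList (t.dropWhile (· == x)) := by
  have h1 : PySem.Set.ofList (x :: t) = t.foldl PySem.Set.add [x] := rfl
  rw [h1]
  conv_lhs => rw [← List.takeWhile_append_dropWhile (p := (· == x)) (l := t)]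
  rw [List.foldl_append]
  rw [pv_foldl_add_of_mem _ [x]
    (fun y hy => by
      have hyx : y = x := by simpa using List.mem_takeWhile_imp hy
      simp [hyx])]
  exact pv_foldl_add_cons x _ [] hx

theorem pv_dropWhile_lt (x : Int) (t : List Int) (hp : (x :: t).Pairwise (· ≤ ·)) :
    ∀ y ∈ t.dropWhile (· == x), x < y := by
  intro y hy
  have hxt : ∀ z ∈ t, x ≤ z := (List.pairwise_cons.1 hp).1
  have hpt : t.Pairwise (· ≤ ·) := (List.pairwise_cons.1 hp).2
  cases hd : t.dropWhile (· == x) with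
  | nil => simp [hd] at hy
  | cons h0 d' =>
    have hh0 : (h0 == x) = false := by
      have := List.head?_dropWhile_not (· == x) t
      rw [hd] at this
      exact this
    have hh0t : h0 ∈ t := (List.dropWhile_suffix (· == x)).subset (by rw [hd]; simp)
    have hxh0 : x < h0 :=
      lt_of_le_of_ne (hxt h0 hh0t) (fun h => (by simp [beq_eq_false_iff_ne] at hh0; exact hh0 h.symm))
    have hpair : (h0 :: d').Pairwise (· ≤ ·) := by
      rw [← hd]
      exact hpt.sublist (List.dropWhile_suffix (· == x)).sublist
    rw [hd] at hy
    rcases List.mem_cons.1 hy with rfl | hy'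
    · exact hxh0
    · exact lt_of_lt_of_le hxh0 ((List.pairwise_cons.1 hpair).1 y hy')

theorem pv_ofList_pairwise_lt (s : List Int) (hp : s.Pairwise (· ≤ ·)) :
    (PySem.Set.ofList s).Pairwise (· < ·) := by
  match s with
  | [] => exact List.Pairwise.nil
  | x :: t =>
    have hlt := pv_dropWhile_lt x t hp
    have hx : x ∉ t.dropWhile (· == x) := fun h => lt_irrefl x (hlt x h)
    rw [pv_ofList_run x t hx]
    have hrest : (t.dropWhile (· == x)).Pairwise (· ≤ ·) :=
      (List.pairwise_cons.1 hp).2.sublist (List.dropWhile_suffix (· == x)).sublist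
    have ih := pv_ofList_pairwise_lt (t.dropWhile (· == x)) hrest
    exact List.pairwise_cons.2
      ⟨fun y hy => hlt y ((PySem.Set.mem_ofList _ _).1 hy), ih⟩
termination_by s.length
decreasing_by
  simp only [List.length_cons]
  exact Nat.lt_succ_of_le (List.length_dropWhile_le _ _)

theorem pv_A_eq_NF (s : List Int) (n : Int) (hp : s.Pairwise (· ≤ ·)) :
    List.foldl
        (fun res p => if p.2 ≠ n then res ++ PySem.List.pyRepeat [p.1] p.2 else res) []
        (PySem.List.sorted2 (PySem.Dict.counter s).items Prod.fst Prod.snd false)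
      = pvNF s n := by
  have hitems : (PySem.Dict.counter s).items
      = (PySem.Set.ofList s).map (fun k => (k, (List.count k s : Int))) :=
    PySem.Dict.items_counter s
  set items := (PySem.Set.ofList s).map (fun k => (k, (List.count k s : Int))) with hitemsdef
  have hpl : items.Pairwise (fun a b => a.1 < b.1) :=
    List.Pairwise.map _ (fun a b h => h) (pv_ofList_pairwise_lt s hp)
  have hsnd : ∀ a ∈ items, ∀ b ∈ items, a.1 = b.1 → a.2 = b.2 := by
    intro a ha b hb h1
    rcases List.mem_map.1 ha with ⟨k1, _, rfl⟩
    rcases List.mem_map.1 hb with ⟨k2, _, rfl⟩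
    simp only at h1 ⊢
    rw [h1]
  have hagree : ∀ a ∈ items, ∀ b, (b ∈ ([] : List (Int × Int)) ∨ b ∈ items) →
      (decide (a.1 < b.1) || (!decide (b.1 < a.1) && decide (a.2 < b.2)))
        = decide (a.1 < b.1) := by
    intro a ha b hb
    rcases hb with hb | hb
    · simp at hb
    by_cases h1 : a.1 < b.1
    · simp [h1]
    by_cases h2 : b.1 < a.1
    · simp [h1, h2]
    have heq : a.1 = b.1 := le_antisymm (not_lt.1 h2) (not_lt.1 h1)
    have := hsnd a ha b hb heq
    simp [h1, h2, this]
  have hs2 : PySem.List.sorted2 items Prod.fst Prod.snd false = items := by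
    have h0 : PySem.List.sorted2 items Prod.fst Prod.snd false
        = List.foldl (fun acc x => PySem.List.insertBy
            (fun a b => decide (a.1 < b.1) || (!decide (b.1 < a.1) && decide (a.2 < b.2))) x acc)
          [] items := rfl
    rw [h0, pv_foldl_insertBy_congr _ (fun a b => decide (a.1 < b.1)) items [] hagree,
      ← PySem.List.sorted_eq_foldl_insertBy items Prod.fst]
    exact PySem.List.sorted_eq_of_perm_of_pairwise_lt items items Prod.fst (List.Perm.refl _) hpl
  rw [hitems, hs2]
  have hbody : (fun (res : List Int) (p : Int × Int) =>
        if p.2 ≠ n then res ++ PySem.List.pyRepeat [p.1] p.2 else res)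
      = fun res p => res ++ (if p.2 ≠ n then PySem.List.pyRepeat [p.1] p.2 else []) := by
    funext res p
    split <;> simp
  rw [hbody, PySem.List.foldl_append_eq_flatMap, List.nil_append, hitemsdef, List.flatMap_map]
  unfold pvNF
  refine List.flatMap_congr (fun k hk => ?_)
  simp only [PySem.List.pyRepeat_singleton, Int.toNat_natCast]

-- the normal form is weakly increasing (blocks of equal values at strictly increasing keys)
theorem pv_NF_pairwise_le_aux (ks : List Int) (f : Int → List Int)
    (hself : ∀ k, ∀ y ∈ f k, y = k) (hks : ks.Pairwise (· < ·)) :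
    (ks.flatMap f).Pairwise (· ≤ ·) := by
  induction ks with
  | nil => simp
  | cons k t ih =>
    simp only [List.flatMap_cons]
    rw [List.pairwise_append]
    refine ⟨?_, ih (List.pairwise_cons.1 hks).2, ?_⟩
    · exact List.pairwise_of_forall_mem_list
        (fun a ha b hb => by rw [hself k a ha, hself k b hb])
    · intro a ha b hb
      rcases List.mem_flatMap.1 hb with ⟨k', hk', hbk'⟩
      rw [hself k a ha, hself k' b hbk']
      exact le_of_lt ((List.pairwise_cons.1 hks).1 k' hk')

-- multiplicity of each value in the normal form
theorem pv_count_flatMap_nodup (x : Int) (ks : List Int) (f : Int → List Int)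
    (hnd : ks.Nodup) (hzero : ∀ k ∈ ks, k ≠ x → List.count x (f k) = 0) :
    List.count x (ks.flatMap f) = if x ∈ ks then List.count x (f x) else 0 := by
  induction ks with
  | nil => simp
  | cons k t ih =>
    simp only [List.flatMap_cons, List.count_append]
    rw [ih (List.nodup_cons.1 hnd).2 (fun k' hk' => hzero k' (by simp [hk']))]
    by_cases hkx : k = x
    · subst hkx
      simp [(List.nodup_cons.1 hnd).1]
    · rw [hzero k (by simp) hkx]
      simp [Ne.symm hkx]

theorem pv_NF_perm_filter (nums : List Int) (n : Int) :
    (pvNF (PySem.List.sorted nums (fun x => x) false) n).Perm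
      (nums.filter (fun x => (List.count x nums : Int) ≠ n)) := by
  set s := PySem.List.sorted nums (fun x => x) false with hs
  have hperm : s.Perm nums := PySem.List.sorted_perm nums (fun x => x) false
  refine List.perm_iff_count.2 (fun x => ?_)
  have hcnt : List.count x s = List.count x nums := hperm.count_eq x
  have hnd : (PySem.Set.ofList s).Nodup := PySem.Set.nodup_ofList s
  have hL : List.count x (pvNF s n)
      = if x ∈ PySem.Set.ofList s then
          (if ((List.count x s : Int)) ≠ n then List.count x s else 0) else 0 := by
    unfold pvNF
    rw [pv_count_flatMap_nodup x _ _ hnd (fun k _ hk => by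
      split
      · exact List.count_eq_zero.2 (fun h => hk ((List.eq_of_mem_replicate h).symm))
      · simp)]
    split
    · split <;> simp
    · rfl
  have hR : List.count x (nums.filter (fun x => (List.count x nums : Int) ≠ n))
      = if ((List.count x nums : Int)) ≠ n then List.count x nums else 0 := by
    by_cases hp : ((List.count x nums : Int)) ≠ n
    · rw [List.count_filter (by simp [hp]), if_pos hp]
    · rw [if_neg hp]
      exact List.count_eq_zero.2 (fun h => hp (by simpa using (List.mem_filter.1 h).2))
  rw [hL, hR, hcnt]
  by_cases hx : x ∈ PySem.Set.ofList s
  · rw [if_pos hx]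
  · rw [if_neg hx]
    have hxn : x ∉ nums := fun h =>
      hx ((PySem.Set.mem_ofList _ _).2 (hperm.mem_iff.2 h))
    simp [List.count_eq_zero.2 hxn]

theorem pv_NF_pairwise (nums : List Int) (n : Int) :
    (pvNF (PySem.List.sorted nums (fun x => x) false) n).Pairwise (· ≤ ·) := by
  unfold pvNF
  refine pv_NF_pairwise_le_aux _ _ (fun k y hy => ?_)
    (pv_ofList_pairwise_lt _ (PySem.List.sorted_pairwise nums (fun x => x)))
  revert hy
  split
  · exact fun hy => List.eq_of_mem_replicate hy
  · simp

-- ===== VERDICT =====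
theorem removeNDuplicates_spec : Claim_equal_removeNDuplicates := by
  intro nums n _
  unfold Spec_removeNDuplicates removeNDuplicates removeNDuplicates_alt
  have hp : (PySem.List.sorted nums (fun x => x) false).Pairwise (· ≤ ·) :=
    PySem.List.sorted_pairwise nums (fun x => x)
  rw [pv_A_eq_NF _ n hp]
  exact (PySem.List.sorted_id_eq_of_perm_of_pairwise _ _
    (pv_NF_perm_filter nums n) (pv_NF_pairwise nums n)).symm
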